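-- pv_equiv track=rewrite | github.com/cchasing/dahman_shape_index | identify_slips.py | identify_slips
-- ===== SOURCE A (Python) =====
-- def identify_slips(vels, vel_thd):
--     sframe = []
--     eframe = []
--     i = 1
--     ended = True  # True if a slip ended and need to look for a start
--     while i < len(vels):
--         if ended:
--             if vels[i-1] < vel_thd and vels[i] > vel_thd:
--                 sframe.append(i-1)
--                 ended = False
--         else:
--             if vels[i-1] > vel_thd and vels[i] < vel_thd:
--                 eframe.append(i)
--                 ended = True
--         i += 1
--     if len(eframe) < len(sframe): # drop off the last slip event start frame which is without the end frame
--         sframe.pop()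
--     return sframe, eframe
-- ===== SOURCE B (Python) =====
-- def identify_slips(vels, vel_thd):
--     n = len(vels)
--     # pass 1: extract crossing edges once
--     rises = [i for i in range(1, n) if vels[i-1] < vel_thd and vels[i] > vel_thd]
--     falls = [i for i in range(1, n) if vels[i-1] > vel_thd and vels[i] < vel_thd]
--     # pass 2: pair edges with a two-pointer merge
--     sframe = []
--     eframe = []
--     k = 0
--     last_end = -1
--     for r in rises:
--         if r < last_end:          # rising edge inside an open slip: ignored
--             continue
--         while k < len(falls) and falls[k] < r:
--             k += 1
--         if k == len(falls):       # dangling start: no matching end, drop it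
--             break
--         sframe.append(r - 1)
--         eframe.append(falls[k])
--         last_end = falls[k]
--         k += 1
--     return sframe, eframe
-- ===== Notes on version B (the rewrite author's own statement) =====
-- stated objective: alternative
-- what changed: A's single stateful frame-by-frame scan with an ended flag is replaced by an edge-extraction pass that builds the lists of rising and falling threshold-crossing indices, followed by a two-pointer merge that pairs each accepted rising edge with the first falling edge after it, skipping rising edges inside an open slip and dropping a dangling start.
import Mathlib
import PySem

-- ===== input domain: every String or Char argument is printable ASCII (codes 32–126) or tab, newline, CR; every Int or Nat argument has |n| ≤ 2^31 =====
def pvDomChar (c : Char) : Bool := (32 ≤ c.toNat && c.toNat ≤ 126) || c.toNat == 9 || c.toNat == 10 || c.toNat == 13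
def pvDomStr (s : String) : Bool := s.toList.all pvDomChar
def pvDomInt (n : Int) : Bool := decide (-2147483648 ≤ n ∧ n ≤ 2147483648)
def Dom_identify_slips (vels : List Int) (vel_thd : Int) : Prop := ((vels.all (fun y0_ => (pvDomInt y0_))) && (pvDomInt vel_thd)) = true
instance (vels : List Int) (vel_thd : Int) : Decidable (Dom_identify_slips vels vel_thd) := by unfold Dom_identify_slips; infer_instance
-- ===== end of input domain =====

-- B replaces A's single stateful frame-by-frame scan by an edge-extraction pass (rising/falling
-- crossing indices) followed by a two-pointer merge of the two edge lists; objective: alternative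
-- decomposition, same overall O(n) cost.

-- ===== PORT A =====
-- the same pair-crossing tests appear verbatim in both Python versions, so both ports share them
def riseAt (vels : List Int) (vel_thd : Int) (i : Int) : Bool :=
  decide (PySem.List.pyGetD vels (i - 1) 0 < vel_thd) && decide (PySem.List.pyGetD vels i 0 > vel_thd)

def fallAt (vels : List Int) (vel_thd : Int) (i : Int) : Bool :=
  decide (PySem.List.pyGetD vels (i - 1) 0 > vel_thd) && decide (PySem.List.pyGetD vels i 0 < vel_thd)

-- A's while loop; indices i stay in [1, len), so pyGetD's default is never read (exact port)
def goA (vels : List Int) (vel_thd : Int) (i : Int) (ended : Bool) (s e : List Int) :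
    List Int × List Int :=
  if _h : i < (vels.length : Int) then
    if ended then
      if riseAt vels vel_thd i then
        goA vels vel_thd (i + 1) false (s ++ [i - 1]) e
      else
        goA vels vel_thd (i + 1) true s e
    else
      if fallAt vels vel_thd i then
        goA vels vel_thd (i + 1) true s (e ++ [i])
      else
        goA vels vel_thd (i + 1) false s e
  else (s, e)
termination_by ((vels.length : Int) - i).toNat
decreasing_by all_goals omega

def identify_slips (vels : List Int) (vel_thd : Int) : List Int × List Int :=
  let p := goA vels vel_thd 1 true [] []
  -- sframe.pop(): sframe is nonempty in this branch, so dropLast is exact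
  if p.2.length < p.1.length then (p.1.dropLast, p.2) else p

-- ===== PORT B =====
-- the inner 'while k < len(falls) and falls[k] < r: k += 1' pointer advance of Source B
def skipLT (r : Int) : List Int → List Int
  | [] => []
  | f :: fs => if f < r then skipLT r fs else f :: fs

-- Source B's 'for r in rises' merge loop; the falls pointer k is the consumed front of the list
def goB (rs fs : List Int) (last_end : Int) (s e : List Int) : List Int × List Int :=
  match rs with
  | [] => (s, e)
  | r :: rs' =>
    if r < last_end then goB rs' fs last_end s e
    else
      match skipLT r fs with
      | [] => (s, e)
      | f :: rest => goB rs' rest f (s ++ [r - 1]) (e ++ [f])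

def identify_slips_alt (vels : List Int) (vel_thd : Int) : List Int × List Int :=
  let n : Int := (vels.length : Int)
  let rises := (PySem.List.pyRange 1 n 1).filter (riseAt vels vel_thd)
  let falls := (PySem.List.pyRange 1 n 1).filter (fallAt vels vel_thd)
  goB rises falls (-1) [] []

-- ===== PRECONDITION & SPEC =====
def Spec_identify_slips (vels : List Int) (vel_thd : Int) (out : List Int × List Int) : Prop := out = identify_slips_alt vels vel_thd
instance (vels : List Int) (vel_thd : Int) (out : List Int × List Int) : Decidable (Spec_identify_slips vels vel_thd out) := by unfold Spec_identify_slips; infer_instance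

-- ===== CLAIM (what is proved, stated in full; the proofs are below) =====
def Claim_equal_identify_slips : Prop := ∀ (vels : List Int) (vel_thd : Int), Dom_identify_slips vels vel_thd → Spec_identify_slips vels vel_thd (identify_slips vels vel_thd)

-- ===== LEMMAS AND PROOFS =====

-- A's trailing dangling-start fix-up, as a function of the loop result
def fixA (p : List Int × List Int) : List Int × List Int :=
  if p.2.length < p.1.length then (p.1.dropLast, p.2) else p

-- the rising / falling edges of the frame suffix [i, len)
def Ls (vels : List Int) (vel_thd : Int) (i : Int) : List Int :=
  (PySem.List.pyRange i (vels.length : Int) 1).filter (riseAt vels vel_thd)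

def Ms (vels : List Int) (vel_thd : Int) (i : Int) : List Int :=
  (PySem.List.pyRange i (vels.length : Int) 1).filter (fallAt vels vel_thd)

lemma rise_not_fall (vels : List Int) (vel_thd : Int) (i : Int)
    (h : riseAt vels vel_thd i = true) : fallAt vels vel_thd i = false := by
  simp only [riseAt, fallAt, Bool.and_eq_true, decide_eq_true_eq] at *
  simp only [Bool.and_eq_false_iff, decide_eq_false_iff_not, not_lt]
  omega

lemma skipLT_append_lt (r : Int) (fs0 l : List Int) (h : ∀ f ∈ fs0, f < r) :
    skipLT r (fs0 ++ l) = skipLT r l := by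
  induction fs0 with
  | nil => rfl
  | cons f fs ih =>
      simp only [List.cons_append, skipLT, if_pos (h f (List.mem_cons_self ..))]
      exact ih (fun x hx => h x (List.mem_cons_of_mem _ hx))

lemma goB_drop_stale (rs0 rs fs : List Int) (le : Int) (s e : List Int)
    (h : ∀ x ∈ rs0, x < le) :
    goB (rs0 ++ rs) fs le s e = goB rs fs le s e := by
  induction rs0 with
  | nil => rfl
  | cons x xs ih =>
      simp only [List.cons_append, goB, if_pos (h x (List.mem_cons_self ..))]
      exact ih (fun y hy => h y (List.mem_cons_of_mem _ hy))

lemma fall_not_rise (vels : List Int) (vel_thd : Int) (i : Int)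
    (h : fallAt vels vel_thd i = true) : riseAt vels vel_thd i = false := by
  by_contra hc
  have := rise_not_fall vels vel_thd i (by revert hc; cases riseAt vels vel_thd i <;> simp)
  simp [this] at h

lemma Ls_step (vels : List Int) (vel_thd : Int) (i : Int) (hin : i < (vels.length : Int)) :
    Ls vels vel_thd i
      = if riseAt vels vel_thd i then i :: Ls vels vel_thd (i+1) else Ls vels vel_thd (i+1) := by
  rw [Ls, PySem.List.pyRange_one_cons hin, List.filter_cons]
  split <;> rfl

lemma Ms_step (vels : List Int) (vel_thd : Int) (i : Int) (hin : i < (vels.length : Int)) :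
    Ms vels vel_thd i
      = if fallAt vels vel_thd i then i :: Ms vels vel_thd (i+1) else Ms vels vel_thd (i+1) := by
  rw [Ms, PySem.List.pyRange_one_cons hin, List.filter_cons]
  split <;> rfl

lemma Ls_stop (vels : List Int) (vel_thd : Int) (i : Int) (hin : (vels.length : Int) ≤ i) :
    Ls vels vel_thd i = [] := by
  rw [Ls, PySem.List.pyRange_one_eq_nil hin]; rfl

lemma Ms_stop (vels : List Int) (vel_thd : Int) (i : Int) (hin : (vels.length : Int) ≤ i) :
    Ms vels vel_thd i = [] := by
  rw [Ms, PySem.List.pyRange_one_eq_nil hin]; rfl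

lemma goA_stop (vels : List Int) (vel_thd : Int) (i : Int) (ended : Bool) (s e : List Int)
    (hin : ¬ i < (vels.length : Int)) : goA vels vel_thd i ended s e = (s, e) := by
  rw [goA]; simp [hin]

lemma fixA_eq (s e : List Int) (h : s.length = e.length) : fixA (s, e) = (s, e) := by
  simp [fixA, h]

lemma fixA_pop (s e : List Int) (r : Int) (h : s.length = e.length) :
    fixA (s ++ [r], e) = (s, e) := by
  simp [fixA, h]

lemma goA_stepT (vels : List Int) (vel_thd : Int) (i : Int) (s e : List Int)
    (hin : i < (vels.length : Int)) :
    goA vels vel_thd i true s e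
      = if riseAt vels vel_thd i then goA vels vel_thd (i+1) false (s ++ [i - 1]) e
        else goA vels vel_thd (i+1) true s e := by
  rw [goA]; simp [hin]

lemma goA_stepF (vels : List Int) (vel_thd : Int) (i : Int) (s e : List Int)
    (hin : i < (vels.length : Int)) :
    goA vels vel_thd i false s e
      = if fallAt vels vel_thd i then goA vels vel_thd (i+1) true s (e ++ [i])
        else goA vels vel_thd (i+1) false s e := by
  rw [goA]; simp [hin]

lemma goB_cons (r : Int) (rs' fs : List Int) (le : Int) (s e : List Int) :
    goB (r :: rs') fs le s e
      = if r < le then goB rs' fs le s e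
        else match skipLT r fs with
          | [] => (s, e)
          | f :: rest => goB rs' rest f (s ++ [r - 1]) (e ++ [f]) := rfl

-- both halves of the simulation invariant at a frame index past the data
lemma sim_stop (vels : List Int) (vel_thd : Int) (i : Int)
    (hin : ¬ i < (vels.length : Int)) :
    ((∀ s e : List Int, ∀ le : Int, ∀ fs0 : List Int,
        s.length = e.length →
        goB (Ls vels vel_thd i) (fs0 ++ Ms vels vel_thd i) le s e
          = fixA (goA vels vel_thd i true s e))
     ∧ (∀ s e : List Int, ∀ r : Int, ∀ rs0 fs0 : List Int,
        s.length = e.length → (∀ f ∈ fs0, f < r) →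
        (match skipLT r (fs0 ++ Ms vels vel_thd i) with
         | [] => (s, e)
         | f :: rest => goB (rs0 ++ Ls vels vel_thd i) rest f (s ++ [r - 1]) (e ++ [f]))
          = fixA (goA vels vel_thd i false (s ++ [r - 1]) e))) := by
  have hL := Ls_stop vels vel_thd i (by omega)
  have hM := Ms_stop vels vel_thd i (by omega)
  constructor
  · intro s e le fs0 hlen
    rw [goA_stop _ _ _ _ _ _ hin, hL, fixA_eq _ _ hlen]
    rfl
  · intro s e r rs0 fs0 hlen hfs0
    rw [goA_stop _ _ _ _ _ _ hin, hM, fixA_pop _ _ _ hlen,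
      show skipLT r (fs0 ++ []) = [] from by
        simpa [skipLT] using skipLT_append_lt r fs0 [] hfs0]

-- the main simulation: A's state machine from frame i against B's merge of the suffix edges
lemma sim (vels : List Int) (vel_thd : Int) :
    ∀ k : Nat, ∀ i : Int, ((vels.length : Int) - i).toNat ≤ k → 1 ≤ i →
      ((∀ s e : List Int, ∀ le : Int, ∀ fs0 : List Int,
          s.length = e.length → le < i → (∀ f ∈ fs0, f < i) →
          goB (Ls vels vel_thd i) (fs0 ++ Ms vels vel_thd i) le s e
            = fixA (goA vels vel_thd i true s e))
       ∧ (∀ s e : List Int, ∀ r : Int, ∀ rs0 fs0 : List Int,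
          s.length = e.length → r < i → (∀ x ∈ rs0, x < i) → (∀ f ∈ fs0, f < r) →
          (match skipLT r (fs0 ++ Ms vels vel_thd i) with
           | [] => (s, e)
           | f :: rest => goB (rs0 ++ Ls vels vel_thd i) rest f (s ++ [r - 1]) (e ++ [f]))
            = fixA (goA vels vel_thd i false (s ++ [r - 1]) e))) := by
  intro k
  induction k with
  | zero =>
      intro i hk _h1
      have hin : ¬ i < (vels.length : Int) := by omega
      have hstop := sim_stop vels vel_thd i hin
      exact ⟨fun s e le fs0 hlen _ _ => hstop.1 s e le fs0 hlen,
             fun s e r rs0 fs0 hlen _ _ hfs0 => hstop.2 s e r rs0 fs0 hlen hfs0⟩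
  | succ k ih =>
      intro i hk h1
      by_cases hin : i < (vels.length : Int)
      · obtain ⟨IHe, IHo⟩ := ih (i+1) (by omega) (by omega)
        constructor
        · -- ended state
          intro s e le fs0 hlen hle hfs0
          rw [goA_stepT vels vel_thd i s e hin, Ls_step vels vel_thd i hin,
            Ms_step vels vel_thd i hin]
          by_cases hr : riseAt vels vel_thd i = true
          · have hf := rise_not_fall vels vel_thd i hr
            rw [hr, hf]
            simp only [if_true, if_false, Bool.false_eq_true]
            rw [goB_cons, if_neg (by omega)]
            simpa using IHo s e i [] fs0 hlen (by omega) (by simp) hfs0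
          · rw [Bool.not_eq_true] at hr
            rw [hr]
            simp only [Bool.false_eq_true, if_false]
            by_cases hf : fallAt vels vel_thd i = true
            · rw [hf]
              simp only [if_true]
              rw [show fs0 ++ i :: Ms vels vel_thd (i+1) = (fs0 ++ [i]) ++ Ms vels vel_thd (i+1)
                  from by simp]
              exact IHe s e le (fs0 ++ [i]) hlen (by omega)
                (by intro f hfm; rcases List.mem_append.1 hfm with h' | h'
                    · exact lt_trans (hfs0 f h') (by omega)
                    · simp at h'; omega)
            · rw [Bool.not_eq_true] at hf
              rw [hf]
              simp only [Bool.false_eq_true, if_false]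
              exact IHe s e le fs0 hlen (by omega)
                (fun f hfm => lt_trans (hfs0 f hfm) (by omega))
        · -- open state (inside the slip started at r)
          intro s e r rs0 fs0 hlen hr hrs0 hfs0
          rw [goA_stepF vels vel_thd i (s ++ [r - 1]) e hin, Ls_step vels vel_thd i hin,
            Ms_step vels vel_thd i hin]
          by_cases hf : fallAt vels vel_thd i = true
          · have hr2 := fall_not_rise vels vel_thd i hf
            rw [hf, hr2]
            simp only [if_true, Bool.false_eq_true, if_false]
            rw [skipLT_append_lt r fs0 _ hfs0,
              show skipLT r (i :: Ms vels vel_thd (i+1)) = i :: Ms vels vel_thd (i+1)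
                from by simp [skipLT]; omega]
            simp only []
            rw [goB_drop_stale rs0 _ _ i _ _ (fun x hx => hrs0 x hx)]
            simpa using IHe (s ++ [r - 1]) (e ++ [i]) i [] (by simp [hlen]) (by omega)
              (by simp)
          · rw [Bool.not_eq_true] at hf
            rw [hf]
            simp only [Bool.false_eq_true, if_false]
            by_cases hr2 : riseAt vels vel_thd i = true
            · rw [hr2]
              simp only [if_true]
              have := IHo s e r (rs0 ++ [i]) fs0 hlen (by omega)
                (by intro x hx; rcases List.mem_append.1 hx with h' | h'
                    · exact lt_trans (hrs0 x h') (by omega)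
                    · simp at h'; omega) hfs0
              simpa [List.append_assoc] using this
            · rw [Bool.not_eq_true] at hr2
              rw [hr2]
              simp only [Bool.false_eq_true, if_false]
              exact IHo s e r rs0 fs0 hlen (by omega)
                (fun x hx => lt_trans (hrs0 x hx) (by omega)) hfs0
      · have hstop := sim_stop vels vel_thd i hin
        exact ⟨fun s e le fs0 hlen _ _ => hstop.1 s e le fs0 hlen,
               fun s e r rs0 fs0 hlen _ _ hfs0 => hstop.2 s e r rs0 fs0 hlen hfs0⟩

-- ===== VERDICT (by name: the statement is the Claim_ definition above) =====
theorem identify_slips_spec : Claim_equal_identify_slips := by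
  intro vels vel_thd _
  unfold Spec_identify_slips
  have h := (sim vels vel_thd ((vels.length : Int) - 1).toNat 1 (le_refl _) (le_refl _)).1
    [] [] (-1) [] rfl (by omega) (by intro f hf; cases hf)
  have h2 : identify_slips_alt vels vel_thd
      = goB (Ls vels vel_thd 1) ([] ++ Ms vels vel_thd 1) (-1) [] [] := by
    simp [identify_slips_alt, Ls, Ms]
  have h3 : identify_slips vels vel_thd = fixA (goA vels vel_thd 1 true [] []) := rfl
  rw [h3, h2, h]
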